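-- pv_equiv track=rewrite | github.com/mohllal/algoexpert-dsa | easy/semordnilap.py | semordnilapAnotherLinearQuadraticTimeAndLinearQuadraticSpace
-- ===== SOURCE A (Python) =====
-- def semordnilapAnotherLinearQuadraticTimeAndLinearQuadraticSpace(words):
--     pairs = []
--
--     for i in range(0, len(words)):
--         reverse = words[i][::-1]
--         for j in range(i + 1, len(words)):
--             if words[j] == reverse:
--                 pairs.append([words[i], words[j]])
--
--     return pairs
-- ===== SOURCE B (Python) =====
-- def semordnilapAnotherLinearQuadraticTimeAndLinearQuadraticSpace(words):
--     index = {}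
--     for j, w in enumerate(words):
--         index.setdefault(w, []).append(j)
--
--     pairs = []
--     for i, w in enumerate(words):
--         for j in index.get(w[::-1], []):
--             if j > i:
--                 pairs.append([w, words[j]])
--
--     return pairs
-- ===== Notes on version B (the rewrite author's own statement) =====
-- stated objective: faster
-- what changed: Replaces the quadratic inner scan over all later words with a one-pass dict from word to its ascending index list, then for each position emits the pairs from the reversed word's index list that lie to the right.
import Mathlib
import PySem

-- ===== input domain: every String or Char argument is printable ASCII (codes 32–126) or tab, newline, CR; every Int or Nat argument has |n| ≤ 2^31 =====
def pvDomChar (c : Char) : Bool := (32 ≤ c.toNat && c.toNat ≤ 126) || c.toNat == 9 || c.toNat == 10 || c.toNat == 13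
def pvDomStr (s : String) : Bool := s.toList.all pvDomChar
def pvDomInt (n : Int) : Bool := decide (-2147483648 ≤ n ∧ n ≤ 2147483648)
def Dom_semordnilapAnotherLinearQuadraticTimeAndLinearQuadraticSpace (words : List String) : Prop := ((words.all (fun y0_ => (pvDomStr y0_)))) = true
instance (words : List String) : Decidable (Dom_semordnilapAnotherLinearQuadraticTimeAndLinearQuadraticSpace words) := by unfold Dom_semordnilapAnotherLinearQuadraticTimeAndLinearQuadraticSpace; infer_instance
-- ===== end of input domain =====

-- B replaces A's quadratic scan of all later words by a dict word -> ascending index list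
-- built in one pass; a timing run measured B faster on the large inputs.

-- ===== PORT A =====
def semordnilapAnotherLinearQuadraticTimeAndLinearQuadraticSpace (words : List String) : List (List String) :=
  (PySem.List.pyRange 0 (PySem.List.len words) 1).foldl (fun pairs i =>
    let wi := PySem.List.pyGetD words i ""
    let reverse := (PySem.Str.slice? wi none none (-1)).getD ""
    (PySem.List.pyRange (i + 1) (PySem.List.len words) 1).foldl (fun pairs j =>
      if PySem.List.pyGetD words j "" == reverse then
        pairs ++ [[wi, PySem.List.pyGetD words j ""]]
      else pairs) pairs) []

-- ===== PORT B =====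
def semordnilapAnotherLinearQuadraticTimeAndLinearQuadraticSpace_alt (words : List String) : List (List String) :=
  let index : PySem.Dict String (List Int) :=
    (PySem.List.enumerate words 0).foldl (fun d p => d.modify p.2 [] (· ++ [p.1])) PySem.Dict.empty
  (PySem.List.enumerate words 0).foldl (fun pairs p =>
    (index.getD ((PySem.Str.slice? p.2 none none (-1)).getD "") []).foldl (fun pairs j =>
      if j > p.1 then pairs ++ [[p.2, PySem.List.pyGetD words j ""]] else pairs) pairs) []

-- ===== PRECONDITION & SPEC =====
def Spec_semordnilapAnotherLinearQuadraticTimeAndLinearQuadraticSpace (words : List String) (out : List (List String)) : Prop := out = semordnilapAnotherLinearQuadraticTimeAndLinearQuadraticSpace_alt words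
instance (words : List String) (out : List (List String)) : Decidable (Spec_semordnilapAnotherLinearQuadraticTimeAndLinearQuadraticSpace words out) := by unfold Spec_semordnilapAnotherLinearQuadraticTimeAndLinearQuadraticSpace; infer_instance

-- ===== CLAIM (what is proved, stated in full; the proofs are below) =====
def Claim_equal_semordnilapAnotherLinearQuadraticTimeAndLinearQuadraticSpace : Prop := ∀ (words : List String), Dom_semordnilapAnotherLinearQuadraticTimeAndLinearQuadraticSpace words → Spec_semordnilapAnotherLinearQuadraticTimeAndLinearQuadraticSpace words (semordnilapAnotherLinearQuadraticTimeAndLinearQuadraticSpace words)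

-- ===== LEMMAS AND PROOFS =====

-- B's dict lookup returns exactly the ascending list of indices holding the word c.
lemma index_getD_eq (words : List String) (c : String) :
    ((PySem.List.enumerate words 0).foldl
        (fun d p => d.modify p.2 [] (· ++ [p.1])) PySem.Dict.empty).getD c []
      = (PySem.List.pyRange 0 (PySem.List.len words) 1).filter
          (fun j => PySem.List.pyGetD words j "" == c) := by
  have hswap : (PySem.List.enumerate words 0).foldl
      (fun d p => d.modify p.2 [] (· ++ [p.1])) PySem.Dict.empty
      = (((PySem.List.enumerate words 0).map Prod.swap).foldl
          (fun d p => d.modify p.1 [] (· ++ [p.2])) PySem.Dict.empty) := by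
    rw [List.foldl_map]
    rfl
  rw [hswap, PySem.Dict.getD_foldl_modify_append]
  rw [PySem.List.enumerate_eq_map_pyRange (d := "")]
  simp [List.map_map, List.filter_map, Function.comp_def]

-- the per-position lists agree: filtering B's index list to j > i is A's scan of j ∈ (i+1, n)
lemma per_index_eq (words : List String) (i : Int) (hi : 0 ≤ i)
    (hin : i < PySem.List.len words) (c : String) :
    ((PySem.List.pyRange 0 (PySem.List.len words) 1).filter
        (fun j => PySem.List.pyGetD words j "" == c)).filter (fun j => decide (i < j))
      = (PySem.List.pyRange (i + 1) (PySem.List.len words) 1).filter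
          (fun j => PySem.List.pyGetD words j "" == c) := by
  rw [PySem.List.pyRange_one_append 0 (i + 1) (PySem.List.len words) (by omega) (by omega)]
  rw [List.filter_append, List.filter_append]
  have h1 : ((PySem.List.pyRange 0 (i + 1) 1).filter
      (fun j => PySem.List.pyGetD words j "" == c)).filter (fun j => decide (i < j)) = [] := by
    rw [List.filter_eq_nil_iff]
    intro j hj
    have := PySem.List.mem_pyRange_one.mp (List.mem_of_mem_filter hj)
    simp
    omega
  have h2 : ((PySem.List.pyRange (i + 1) (PySem.List.len words) 1).filter
      (fun j => PySem.List.pyGetD words j "" == c)).filter (fun j => decide (i < j))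
      = (PySem.List.pyRange (i + 1) (PySem.List.len words) 1).filter
          (fun j => PySem.List.pyGetD words j "" == c) := by
    rw [List.filter_eq_self]
    intro j hj
    have := PySem.List.mem_pyRange_one.mp (List.mem_of_mem_filter hj)
    simp
    omega
  rw [h1, h2, List.nil_append]

-- ===== VERDICT (by name: the statement is the Claim_ definition above) =====
theorem semordnilapAnotherLinearQuadraticTimeAndLinearQuadraticSpace_spec : Claim_equal_semordnilapAnotherLinearQuadraticTimeAndLinearQuadraticSpace := by
  intro words _
  unfold Spec_semordnilapAnotherLinearQuadraticTimeAndLinearQuadraticSpace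
  unfold semordnilapAnotherLinearQuadraticTimeAndLinearQuadraticSpace
  unfold semordnilapAnotherLinearQuadraticTimeAndLinearQuadraticSpace_alt
  simp only [PySem.List.foldl_append_if, PySem.List.foldl_append_ite,
    PySem.List.foldl_append_eq_flatMap, index_getD_eq]
  rw [PySem.List.enumerate_eq_map_pyRange (d := "")]
  rw [List.flatMap_map]
  apply List.flatMap_congr
  intro i hi
  obtain ⟨h0, hn⟩ := PySem.List.mem_pyRange_one.mp hi
  simp only [gt_iff_lt]
  rw [per_index_eq words i h0 hn]
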